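-- pv_equiv track=rewrite | github.com/JohannesWaltmann/advent_of_code_2021 | day_03/day03.py | get_epsilon_rate
-- ===== SOURCE A (Python) =====
-- def get_epsilon_rate(data) -> str:
--     """
--     Computes the epsilon rate by taking the least common bit for each bit in all binary entries of the given data set.
--
--     :param data: Array of binary numbers arranged as Strings.
--     :return: Epsilon rate as a string of binary values.
--     """
--     _output = ''
--
--     for elem in range(len(data[0])):
--         _count_zeroes = 0
--         _count_ones = 0
--
--         # Iterate over each bit of the entries
--         for bit in range(len(data)):
--             if int(data[bit][elem]) == 0:
--                 _count_zeroes += 1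
--             elif int(data[bit][elem]) == 1:
--                 _count_ones += 1
--
--         # Check if there are more '1' or '0' for the current bit
--         if _count_ones > _count_zeroes:
--             _output += '0'
--         else:
--             _output += '1'
--
--     return _output
-- ===== SOURCE B (Python) =====
-- def get_epsilon_rate(data) -> str:
--     """Row-outer single pass: tally ones/zeros per column, then emit the result."""
--     width = len(data[0])
--     ones = [0] * width
--     zeros = [0] * width
--     for row in data:
--         for i in range(width):
--             v = int(row[i])
--             if v == 1:
--                 ones[i] += 1
--             elif v == 0:
--                 zeros[i] += 1
--     return ''.join('0' if ones[i] > zeros[i] else '1' for i in range(width))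
-- ===== Notes on version B (the rewrite author's own statement) =====
-- stated objective: alternative
-- what changed: Reverses the loop nesting: instead of A's column-outer scan that recounts the whole data list for every bit position, B makes one row-outer pass building per-column ones/zeros tallies and then emits the output string in a separate pass over the columns.
import Mathlib
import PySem

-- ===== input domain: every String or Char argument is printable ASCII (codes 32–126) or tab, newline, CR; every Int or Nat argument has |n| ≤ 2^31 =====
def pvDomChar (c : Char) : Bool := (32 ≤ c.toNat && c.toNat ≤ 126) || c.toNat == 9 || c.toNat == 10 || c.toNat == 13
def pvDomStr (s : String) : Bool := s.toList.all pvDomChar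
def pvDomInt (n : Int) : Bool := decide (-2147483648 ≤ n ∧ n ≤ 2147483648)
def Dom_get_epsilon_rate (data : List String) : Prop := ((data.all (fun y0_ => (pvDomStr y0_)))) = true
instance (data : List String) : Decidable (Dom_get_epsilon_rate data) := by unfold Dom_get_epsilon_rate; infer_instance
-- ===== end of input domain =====

-- B reverses A's loop nesting: one row-outer pass building per-column (ones, zeros) tallies, then a
-- separate column pass emitting the string — an alternative decomposition of the same cost.

-- ===== PORT A =====
-- Column-outer: for each bit position rescan all rows counting (zeros, ones), append '0'/'1'.
-- int(c) for the digit characters admitted by Pre_ is ported exactly as c.toNat - 48.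
def get_epsilon_rate (data : List String) : String :=
  (List.range (data.headD "").length).foldl (fun out elem =>
    let zo := (List.range data.length).foldl (fun (zo : Int × Int) bit =>
      if (((data.getD bit "").toList.getD elem ' ').toNat : Int) - 48 = 0 then (zo.1 + 1, zo.2)
      else if (((data.getD bit "").toList.getD elem ' ').toNat : Int) - 48 = 1 then (zo.1, zo.2 + 1)
      else zo) ((0 : Int), (0 : Int))
    out ++ (if zo.2 > zo.1 then "0" else "1")) ""

-- ===== PORT B =====
-- Row-outer: fold over the rows updating the per-column (ones, zeros) tally list, then map to chars.
def get_epsilon_rate_alt (data : List String) : String :=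
  String.ofList
    ((data.foldl (fun (t : List (Int × Int)) row =>
        t.mapIdx (fun i p =>
          let v : Int := ((row.toList.getD i ' ').toNat : Int) - 48
          if v = 1 then (p.1 + 1, p.2) else if v = 0 then (p.1, p.2 + 1) else p))
      (List.replicate (data.headD "").length ((0 : Int), (0 : Int)))).map
      (fun p => if p.1 > p.2 then '0' else '1'))

-- ===== PRECONDITION & SPEC =====
-- Pre_ excludes exactly the inputs where Python A raises: empty data (IndexError on data[0]),
-- a row shorter than the first row (IndexError), or a non-digit character in a scanned column (ValueError).
def Pre_get_epsilon_rate (data : List String) : Prop :=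
  data ≠ [] ∧ (data.all (fun row =>
    decide ((data.headD "").length ≤ row.length) &&
    (row.toList.take (data.headD "").length).all Char.isDigit)) = true
instance (data : List String) : Decidable (Pre_get_epsilon_rate data) := by
  unfold Pre_get_epsilon_rate; infer_instance

def pvWitness_get_epsilon_rate : List String := ["01", "10", "11"]

def Spec_get_epsilon_rate (data : List String) (out : String) : Prop := out = get_epsilon_rate_alt data
instance (data : List String) (out : String) : Decidable (Spec_get_epsilon_rate data out) := by unfold Spec_get_epsilon_rate; infer_instance

-- ===== CLAIM (what is proved, stated in full; the proofs are below) =====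
def Claim_equal_get_epsilon_rate : Prop := ∀ (data : List String), Dom_get_epsilon_rate data → Pre_get_epsilon_rate data → Spec_get_epsilon_rate data (get_epsilon_rate data)

-- ===== LEMMAS AND PROOFS =====

-- A's step on a (zeros, ones) pair for the character of `row` at column `i`.
def pvStepA (i : Nat) (zo : Int × Int) (row : String) : Int × Int :=
  if ((row.toList.getD i ' ').toNat : Int) - 48 = 0 then (zo.1 + 1, zo.2)
  else if ((row.toList.getD i ' ').toNat : Int) - 48 = 1 then (zo.1, zo.2 + 1)
  else zo

-- B's per-cell step on an (ones, zeros) pair.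
def pvCellB (row : String) (i : Nat) (p : Int × Int) : Int × Int :=
  let v : Int := ((row.toList.getD i ' ').toNat : Int) - 48
  if v = 1 then (p.1 + 1, p.2) else if v = 0 then (p.1, p.2 + 1) else p

-- A's column count for column i (zeros, ones).
def pvColA (data : List String) (i : Nat) : Int × Int := data.foldl (pvStepA i) (0, 0)

-- a foldl over range(len xs) reading xs.getD is a foldl over xs itself
theorem pv_foldl_range_getD {α β : Type} (xs : List α) (d : α) (f : β → α → β) :
    ∀ (init : β), (List.range xs.length).foldl (fun acc i => f acc (xs.getD i d)) init = xs.foldl f init := by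
  induction xs with
  | nil => intro init; simp
  | cons x xs ih =>
    intro init
    simp [List.range_succ_eq_map, List.foldl_map]
    exact ih (f init x)

-- B's tallies, read at one index, are the fold of the per-cell step over the rows
theorem pv_foldlB_get? (data : List String) :
    ∀ (t : List (Int × Int)) (i : Nat),
      (data.foldl (fun (t : List (Int × Int)) row =>
        t.mapIdx (fun i p =>
          let v : Int := ((row.toList.getD i ' ').toNat : Int) - 48
          if v = 1 then (p.1 + 1, p.2) else if v = 0 then (p.1, p.2 + 1) else p)) t)[i]? =
      Option.map (fun p => data.foldl (fun p row => pvCellB row i p) p) t[i]? := by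
  induction data with
  | nil => intro t i; simp
  | cons row rest ih =>
    intro t i
    simp only [List.foldl_cons]
    rw [ih]
    simp only [List.getElem?_mapIdx, pvCellB]
    cases t[i]? <;> simp

-- B's cell fold is A's (zeros, ones) fold with the components swapped
theorem pv_cell_swap (i : Nat) (data : List String) :
    ∀ (p : Int × Int),
      data.foldl (fun p row => pvCellB row i p) p = Prod.swap (data.foldl (pvStepA i) (p.2, p.1)) := by
  induction data with
  | nil => intro p; simp
  | cons row rest ih =>
    intro p
    simp only [List.foldl_cons]
    have : pvCellB row i p = Prod.swap (pvStepA i (p.2, p.1) row) := by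
      simp only [pvCellB, pvStepA]
      split_ifs <;> simp_all
    rw [this, ih]
    simp

-- a fold appending one-character strings builds the mapped list
theorem pv_foldl_append (c : Nat → Char) :
    ∀ (l : List Nat) (acc : String),
      (l.foldl (fun out i => out ++ String.ofList [c i]) acc).toList = acc.toList ++ l.map c := by
  intro l
  induction l with
  | nil => intro acc; simp
  | cons a l ih =>
    intro acc
    simp only [List.foldl_cons, List.map_cons]
    rw [ih]
    simp

theorem get_epsilon_rate_eq_alt (data : List String) :
    get_epsilon_rate data = get_epsilon_rate_alt data := by
  unfold get_epsilon_rate get_epsilon_rate_alt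
  apply String.toList_inj.mp
  have hfun : (fun (out : String) (elem : Nat) =>
      let zo := (List.range data.length).foldl (fun (zo : Int × Int) bit =>
        if (((data.getD bit "").toList.getD elem ' ').toNat : Int) - 48 = 0 then (zo.1 + 1, zo.2)
        else if (((data.getD bit "").toList.getD elem ' ').toNat : Int) - 48 = 1 then (zo.1, zo.2 + 1)
        else zo) ((0 : Int), (0 : Int))
      out ++ (if zo.2 > zo.1 then "0" else "1"))
      = (fun out i => out ++ String.ofList
          [if (pvColA data i).2 > (pvColA data i).1 then '0' else '1']) := by
    funext out elem
    have h1 : (List.range data.length).foldl (fun (zo : Int × Int) bit =>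
        if (((data.getD bit "").toList.getD elem ' ').toNat : Int) - 48 = 0 then (zo.1 + 1, zo.2)
        else if (((data.getD bit "").toList.getD elem ' ').toNat : Int) - 48 = 1 then (zo.1, zo.2 + 1)
        else zo) ((0 : Int), (0 : Int)) = pvColA data elem :=
      pv_foldl_range_getD data "" (pvStepA elem) (0, 0)
    simp only [h1]
    split_ifs <;> rfl
  rw [hfun, pv_foldl_append]
  simp only [String.toList_empty, List.nil_append, String.toList_ofList]
  apply List.ext_getElem?
  intro i
  rw [List.getElem?_map, List.getElem?_map, pv_foldlB_get?]
  by_cases hi : i < (data.headD "").length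
  · rw [List.getElem?_range hi]
    rw [List.getElem?_replicate_of_lt hi]
    simp only [Option.map_some]
    rw [pv_cell_swap]
    rcases h : data.foldl (pvStepA i) (0, 0) with ⟨z, o⟩
    simp [pvColA, h]
  · rw [List.getElem?_eq_none (by simpa using hi),
      List.getElem?_eq_none (by rw [List.length_replicate]; omega)]
    rfl

-- ===== VERDICT (by name: the statement is the Claim_ definition above) =====
theorem get_epsilon_rate_spec : Claim_equal_get_epsilon_rate := by
  intro data _ _
  exact (get_epsilon_rate_eq_alt data)
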